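-- pv_equiv track=rewrite | github.com/devdrx/cp-submissions | henge.py | process_sum
-- ===== SOURCE A (Python) =====
-- def process_sum(numbers, index, total):
--     if index == len(numbers):
--         return total
--     y = numbers[index]
--     if y <= 0:
--         return process_sum(numbers, index + 1, total + y ** 4)
--     else:
--         return process_sum(numbers, index + 1, total)
-- ===== SOURCE B (Python) =====
-- def process_sum(numbers, index, total):
--     for i in range(index, len(numbers)):
--         y = numbers[i]
--         if y <= 0:
--             total += y ** 4
--     return total
-- ===== Notes on version B (the rewrite author's own statement) =====
-- stated objective: simpler
-- what changed: Replaced A's tail recursion (one Python call frame per element) with a single iterative for-loop over range(index, len(numbers)) accumulating into total.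
-- outside the precondition, e.g. on process_sum([1, 2], 3, 7): A raises IndexError, B returns 7
import Mathlib
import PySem

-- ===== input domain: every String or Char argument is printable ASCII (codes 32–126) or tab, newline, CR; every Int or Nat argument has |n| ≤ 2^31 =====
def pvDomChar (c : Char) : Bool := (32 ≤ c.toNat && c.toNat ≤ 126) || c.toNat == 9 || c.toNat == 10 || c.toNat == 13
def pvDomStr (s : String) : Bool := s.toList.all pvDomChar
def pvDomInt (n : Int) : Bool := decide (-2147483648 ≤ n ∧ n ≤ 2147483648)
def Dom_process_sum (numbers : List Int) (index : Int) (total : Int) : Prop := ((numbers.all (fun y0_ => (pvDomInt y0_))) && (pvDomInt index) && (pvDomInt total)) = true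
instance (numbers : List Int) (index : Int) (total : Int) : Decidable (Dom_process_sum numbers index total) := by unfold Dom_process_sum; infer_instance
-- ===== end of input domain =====

-- B replaces A's tail recursion by a single iterative for-loop (simpler, O(1) space); return values agree on Pre_.

-- ===== PORT A =====
-- A's tail recursion; numbers[index] is PySem.List.pyGet? (none = IndexError, outside Pre_, port returns total there).
def process_sum (numbers : List Int) (index : Int) (total : Int) : Int :=
  if index = (numbers.length : Int) then total
  else
    match h : PySem.List.pyGet? numbers index with
    | none => total  -- Python raises IndexError here; excluded by Pre_process_sum
    | some y =>
      if y ≤ 0 then process_sum numbers (index + 1) (total + y ^ 4)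
      else process_sum numbers (index + 1) total
termination_by ((numbers.length : Int) - index).toNat
decreasing_by
  all_goals
    have hin : ¬ (PySem.List.pyGet? numbers index = none) := by simp [h]
    rw [PySem.List.pyGet?_eq_none_iff] at hin
    simp [PySem.Raise.InRange] at hin
    omega

-- ===== PORT B =====
-- B: for i in range(index, len(numbers)): y = numbers[i]; if y <= 0: total += y**4
def process_sum_alt (numbers : List Int) (index : Int) (total : Int) : Int :=
  (PySem.List.pyRange index (numbers.length : Int) 1).foldl
    (fun t i =>
      match PySem.List.pyGet? numbers i with
      | none => t  -- Python raises IndexError here; excluded by Pre_process_sum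
      | some y => if y ≤ 0 then t + y ^ 4 else t)
    total

-- ===== PRECONDITION & SPEC =====
-- Pre_ excludes exactly the inputs where Python A raises IndexError: index > len(numbers)
-- (numbers[index] out of range after the recursion never meets len) or index < -len(numbers).
def Pre_process_sum (numbers : List Int) (index : Int) (total : Int) : Prop :=
  -(numbers.length : Int) ≤ index ∧ index ≤ (numbers.length : Int)
instance (numbers : List Int) (index : Int) (total : Int) : Decidable (Pre_process_sum numbers index total) := by unfold Pre_process_sum; infer_instance

def pvWitness_process_sum : List Int × Int × Int := ([-2, 3, 0, -1], 1, 5)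

def Spec_process_sum (numbers : List Int) (index : Int) (total : Int) (out : Int) : Prop := out = process_sum_alt numbers index total
instance (numbers : List Int) (index : Int) (total : Int) (out : Int) : Decidable (Spec_process_sum numbers index total out) := by unfold Spec_process_sum; infer_instance

-- ===== CLAIM (what is proved, stated in full; the proofs are below) =====
def Claim_equal_process_sum : Prop := ∀ (numbers : List Int) (index : Int) (total : Int), Dom_process_sum numbers index total → Pre_process_sum numbers index total → Spec_process_sum numbers index total (process_sum numbers index total)

-- ===== LEMMAS AND PROOFS =====

-- Main invariant: on in-range indices, A's recursion computes B's fold over the remaining range.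
theorem process_sum_eq_alt (numbers : List Int) (index total : Int)
    (h1 : -(numbers.length : Int) ≤ index) (h2 : index ≤ (numbers.length : Int)) :
    process_sum numbers index total = process_sum_alt numbers index total := by
  by_cases heq : index = (numbers.length : Int)
  · subst heq
    rw [process_sum, process_sum_alt]
    simp [PySem.List.pyRange_one_eq_nil (le_refl _)]
  · have hlt : index < (numbers.length : Int) := lt_of_le_of_ne h2 heq
    have hlen0 : 0 < numbers.length := by omega
    have hsome : ∃ y, PySem.List.pyGet? numbers index = some y := by
      cases hg : PySem.List.pyGet? numbers index with
      | none =>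
        rw [PySem.List.pyGet?_eq_none_iff] at hg
        exact absurd (by simp [PySem.Raise.InRange]; omega) hg
      | some y => exact ⟨y, rfl⟩
    obtain ⟨y, hy⟩ := hsome
    rw [process_sum, process_sum_alt, PySem.List.pyRange_one_cons hlt]
    simp only [if_neg heq, List.foldl_cons, hy]
    split
    · next hnone => rw [hy] at hnone; cases hnone
    · next y' hy' =>
      rw [hy] at hy'
      cases hy'
      have ih := process_sum_eq_alt numbers (index + 1)
        (if y ≤ 0 then total + y ^ 4 else total) (by omega) (by omega)
      by_cases hy0 : y ≤ 0 <;> simp only [hy0, if_true, if_false] at ih ⊢ <;>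
        rw [ih] <;> rfl
termination_by ((numbers.length : Int) - index).toNat
decreasing_by omega

-- ===== VERDICT (by name: the statement is the Claim_ definition above) =====
theorem process_sum_spec : Claim_equal_process_sum := by
  intro numbers index total _ hpre
  exact process_sum_eq_alt numbers index total hpre.1 hpre.2
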